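-- pv_equiv track=rewrite | github.com/pypi-data/pypi-mirror-398 | packages/agon-python/agon_python-0.1.0-py3-none-any.whl/agon/formats/struct.py | _unquote_string
-- ===== SOURCE A (Python) =====
-- def _unquote_string(s: str) -> str:
--     """Unquote and unescape a quoted string value."""
--     if not (s.startswith('"') and s.endswith('"')):
--         return s
--     inner = s[1:-1]
--     result: list[str] = []
--     i = 0
--     while i < len(inner):
--         if inner[i] == "\\" and i + 1 < len(inner):
--             c = inner[i + 1]
--             if c == "n":
--                 result.append("\n")
--             elif c == "r":
--                 result.append("\r")
--             elif c == "\\":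
--                 result.append("\\")
--             elif c == '"':
--                 result.append('"')
--             else:
--                 result.append(inner[i + 1])
--             i += 2
--         else:
--             result.append(inner[i])
--             i += 1
--     return "".join(result)
-- ===== SOURCE B (Python) =====
-- def _unquote_string(s: str) -> str:
--     """Unquote and unescape a quoted string value."""
--     if not (s.startswith('"') and s.endswith('"')):
--         return s
--     table = {"n": "\n", "r": "\r", '"': '"'}
--     # Stage 1: split the inner text on backslashes; every part after the first
--     # begins at the character that was escaped.  An empty part means the escape
--     # character was itself a backslash (or a lone trailing backslash).
--     parts = s[1:-1].split("\\")
--     out = [parts[0]]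
--     i = 1
--     while i < len(parts):
--         p = parts[i]
--         if p == "":
--             out.append("\\")
--             i += 1
--             if i < len(parts):  # text after a '\\\\' escape is literal
--                 out.append(parts[i])
--                 i += 1
--         else:
--             out.append(table.get(p[0], p[0]) + p[1:])
--             i += 1
--     return "".join(out)
-- ===== Notes on version B (the rewrite author's own statement) =====
-- stated objective: alternative
-- what changed: Replaces A's character-by-character index walk with manual i+=1/i+=2 stepping and a five-way elif chain by a two-stage pipeline: split the inner text on backslashes once, then reassemble the parts, decoding only each part's first character through a lookup table (an empty part marks a backslash escape).
import Mathlib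
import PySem

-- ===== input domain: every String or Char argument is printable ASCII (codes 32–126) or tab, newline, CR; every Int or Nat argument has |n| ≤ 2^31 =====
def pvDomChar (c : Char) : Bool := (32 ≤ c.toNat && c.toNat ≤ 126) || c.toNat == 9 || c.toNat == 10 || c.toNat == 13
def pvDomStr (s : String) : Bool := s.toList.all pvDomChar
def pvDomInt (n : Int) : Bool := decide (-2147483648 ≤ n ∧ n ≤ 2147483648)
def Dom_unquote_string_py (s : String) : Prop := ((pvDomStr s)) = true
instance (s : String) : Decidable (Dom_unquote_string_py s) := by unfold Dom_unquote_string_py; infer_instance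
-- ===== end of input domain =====

-- B replaces A's single character-by-character index loop by two stages: split the inner
-- text on backslashes, then reassemble the parts, decoding each part's first character
-- (objective: alternative decomposition; same cost).

-- ===== PORT A =====
-- the elif chain of A's escape branch; else-branch appends inner[i+1] itself
def pvEscA (c : Char) : List Char :=
  if c = 'n' then ['\n']
  else if c = 'r' then ['\r']
  else if c = '\\' then ['\\']
  else if c = '"' then ['"']
  else [c]

-- A's while-loop over index i; inner[i] / inner[i+1] are always in range when read
-- (the loop guard and the `i + 1 < len(inner)` test guarantee it), so getD is exact here.
def pvLoopA (inner : List Char) (i : Nat) (acc : List (List Char)) : List (List Char) :=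
  if i < inner.length then
    if inner.getD i ' ' = '\\' ∧ i + 1 < inner.length then
      pvLoopA inner (i + 2) (acc ++ [pvEscA (inner.getD (i + 1) ' ')])
    else
      pvLoopA inner (i + 1) (acc ++ [[inner.getD i ' ']])
  else acc
termination_by inner.length - i

def unquote_string_py (s : String) : String :=
  if ¬ (PySem.Str.startswith s "\"" = true ∧ PySem.Str.endswith s "\"" = true) then s
  else
    String.ofList (PySem.Chars.join []
      (pvLoopA (PySem.Chars.slice s.toList (some 1) (some (-1))) 0 []))

-- ===== PORT B =====
def pvTabB : PySem.Dict Char Char :=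
  PySem.Dict.ofList [('n', '\n'), ('r', '\r'), ('"', '"')]

-- B's while-loop over parts[1:]: an empty part is a backslash escape (or a lone trailing
-- backslash); after it the following part is appended literally; a nonempty part's first
-- character is decoded through the table.  Returns the pieces the loop appends to `out`.
def pvPartsLoopB : List (List Char) → List (List Char)
  | [] => []
  | [] :: [] => [['\\']]
  | [] :: q :: rest => ['\\'] :: q :: pvPartsLoopB rest
  | (c :: p) :: rest => (pvTabB.getD c c :: p) :: pvPartsLoopB rest

-- str.split('\\') ported as List.splitOn '\\' (same semantics for a one-char separator)
def unquote_string_py_alt (s : String) : String :=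
  if PySem.Str.startswith s "\"" && PySem.Str.endswith s "\"" then
    match List.splitOn '\\' (PySem.Chars.slice s.toList (some 1) (some (-1))) with
    | [] => s      -- unreachable: split never returns an empty list
    | h :: t => String.ofList (PySem.Chars.join [] (h :: pvPartsLoopB t))
  else s

-- ===== PRECONDITION & SPEC =====
def Spec_unquote_string_py (s : String) (out : String) : Prop := out = unquote_string_py_alt s
instance (s : String) (out : String) : Decidable (Spec_unquote_string_py s out) := by unfold Spec_unquote_string_py; infer_instance

-- ===== CLAIM (what is proved, stated in full; the proofs are below) =====
def Claim_equal_unquote_string_py : Prop := ∀ (s : String), Dom_unquote_string_py s → Spec_unquote_string_py s (unquote_string_py s)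

-- ===== LEMMAS AND PROOFS =====

-- the canonical two-at-a-time scan both programs compute
def pvScan : List Char → List Char
  | [] => []
  | [c] => if c = '\\' then ['\\'] else [c]
  | c :: nxt :: rest => if c = '\\' then pvTabB.getD nxt nxt :: pvScan rest else c :: pvScan (nxt :: rest)

theorem pvTabB_eq_mk :
    pvTabB = PySem.Dict.mk [('n', '\n'), ('r', '\r'), ('"', '"')] := by decide

theorem pvEscA_eq_table (c : Char) : pvEscA c = [pvTabB.getD c c] := by
  unfold pvEscA
  rw [pvTabB_eq_mk]
  split_ifs with h1 h2 h3 h4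
  · subst h1; decide
  · subst h2; decide
  · subst h3; decide
  · subst h4; decide
  · simp [PySem.Dict.getD, PySem.Dict.get?, Ne.symm h1, Ne.symm h2, Ne.symm h4]

theorem pvScan_cons_ne {c : Char} (rest : List Char) (h : c ≠ '\\') :
    pvScan (c :: rest) = c :: pvScan rest := by
  cases rest <;> simp [pvScan, h]

theorem pvLoopA_eq (n : Nat) (inner : List Char) (i : Nat) (acc : List (List Char))
    (hn : inner.length - i ≤ n) :
    pvLoopA inner i acc = acc ++ (pvScan (inner.drop i)).map (fun c => [c]) := by
  induction n generalizing i acc with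
  | zero =>
    have hi : ¬ i < inner.length := by omega
    rw [pvLoopA]
    simp [hi, List.drop_eq_nil_of_le (by omega : inner.length ≤ i), pvScan]
  | succ n ih =>
    by_cases hi : i < inner.length
    · have hdrop : inner.drop i = inner[i] :: inner.drop (i + 1) :=
        List.drop_eq_getElem_cons hi
      rw [pvLoopA]
      by_cases hesc : inner.getD i ' ' = '\\' ∧ i + 1 < inner.length
      · obtain ⟨hc, hlt⟩ := hesc
        have hdrop2 : inner.drop (i + 1) = inner[i + 1] :: inner.drop (i + 2) :=
          List.drop_eq_getElem_cons hlt
        rw [if_pos hi, if_pos ⟨hc, hlt⟩, ih (i + 2) _ (by omega), hdrop, hdrop2,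
          List.getD_eq_getElem _ _ hlt]
        rw [List.getD_eq_getElem _ _ hi] at hc
        simp [pvScan, hc, pvEscA_eq_table]
      · rw [if_pos hi, if_neg hesc, ih (i + 1) _ (by omega)]
        rw [hdrop]
        rw [List.getD_eq_getElem _ _ hi] at hesc ⊢
        by_cases hc : inner[i] = '\\'
        · -- then i + 1 = inner.length: the trailing lone backslash
          have hend : ¬ i + 1 < inner.length := fun h => hesc ⟨hc, h⟩
          have : inner.drop (i + 1) = [] := List.drop_eq_nil_of_le (by omega)
          simp [this, pvScan, hc]
        · rw [pvScan_cons_ne _ hc]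
          simp
    · rw [pvLoopA]
      simp [hi, List.drop_eq_nil_of_le (by omega : inner.length ≤ i), pvScan]

theorem pvJoin_nil_eq_flatten (ps : List (List Char)) :
    PySem.Chars.join [] ps = ps.flatten := by
  induction ps with
  | nil => simp [PySem.Chars.join_nil]
  | cons p rest ih =>
    cases rest with
    | nil => simp [PySem.Chars.join_singleton]
    | cons q rest' =>
      rw [PySem.Chars.join_cons_cons]
      simp_all

-- rebuild = parts[0] followed by the pieces B's while-loop appends, flattened
def pvRebuild (ps : List (List Char)) : List Char :=
  match ps with
  | [] => []
  | h :: t => h ++ (pvPartsLoopB t).flatten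

theorem pvRebuild_splitOnP (n : Nat) (l : List Char) (hn : l.length ≤ n) :
    pvRebuild (List.splitOnP (· == '\\') l) = pvScan l := by
  induction n generalizing l with
  | zero =>
    have : l = [] := List.eq_nil_of_length_eq_zero (by omega)
    subst this
    simp [List.splitOnP_nil, pvRebuild, pvPartsLoopB, pvScan]
  | succ n ih =>
    cases l with
    | nil => simp [List.splitOnP_nil, pvRebuild, pvPartsLoopB, pvScan]
    | cons c l' =>
      rw [List.splitOnP_cons]
      by_cases hc : c = '\\'
      · subst hc
        rw [if_pos (by simp)]
        cases l' with
        | nil =>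
          simp [List.splitOnP_nil, pvRebuild, pvPartsLoopB, pvScan]
        | cons d l'' =>
          rw [List.splitOnP_cons]
          by_cases hd : d = '\\'
          · subst hd
            rw [if_pos (by simp)]
            obtain ⟨q, t, hqt⟩ := List.exists_cons_of_ne_nil (List.splitOnP_ne_nil (· == '\\') l'')
            have hrec := ih l'' (by simp at hn ⊢; omega)
            rw [hqt] at hrec ⊢
            simp only [pvRebuild, pvPartsLoopB, List.flatten_cons] at hrec ⊢
            have htab : pvTabB.getD '\\' '\\' = '\\' := by decide
            simp [pvScan, htab, ← hrec]
          · rw [if_neg (by simp [hd])]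
            obtain ⟨q, t, hqt⟩ := List.exists_cons_of_ne_nil (List.splitOnP_ne_nil (· == '\\') l'')
            have hrec := ih l'' (by simp at hn ⊢; omega)
            rw [hqt] at hrec ⊢
            simp only [pvRebuild, pvPartsLoopB, List.flatten_cons, List.modifyHead_cons] at hrec ⊢
            simp [pvScan, ← hrec]
      · rw [if_neg (by simp [hc])]
        obtain ⟨q, t, hqt⟩ := List.exists_cons_of_ne_nil (List.splitOnP_ne_nil (· == '\\') l')
        have hrec := ih l' (by simp at hn ⊢; omega)
        rw [hqt] at hrec ⊢
        simp only [pvRebuild, List.modifyHead_cons] at hrec ⊢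
        rw [pvScan_cons_ne _ hc, ← hrec]
        simp

theorem pvSplitOn_eq (l : List Char) :
    List.splitOn '\\' l = List.splitOnP (· == '\\') l := rfl

-- ===== VERDICT (by name: the statement is the Claim_ definition above) =====
theorem unquote_string_py_spec : Claim_equal_unquote_string_py := by
  intro s _
  unfold Spec_unquote_string_py unquote_string_py unquote_string_py_alt
  by_cases h : PySem.Str.startswith s "\"" = true ∧ PySem.Str.endswith s "\"" = true
  · rw [if_neg (not_not_intro h), if_pos (by rw [Bool.and_eq_true]; exact h)]
    set inner := PySem.Chars.slice s.toList (some 1) (some (-1)) with hinner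
    rw [pvLoopA_eq inner.length inner 0 [] (by omega)]
    obtain ⟨q, t, hqt⟩ := List.exists_cons_of_ne_nil (List.splitOnP_ne_nil (· == '\\') inner)
    have hreb := pvRebuild_splitOnP inner.length inner (le_refl _)
    rw [pvSplitOn_eq, hqt]
    rw [hqt] at hreb
    simp only [pvRebuild] at hreb
    simp only [List.nil_append, List.drop_zero,
      pvJoin_nil_eq_flatten, List.flatten_cons, hreb]
    congr 1
    induction pvScan inner with
    | nil => rfl
    | cons a l ihx => simp [ihx]
  · rw [if_pos h, if_neg (by rw [Bool.and_eq_true]; exact h)]
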